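-- pv_equiv track=rewrite | github.com/automatisieren/Hacker-Rank-Python-Solutions | Task_25.py | form_line
-- ===== SOURCE A (Python) =====
-- def form_line( size : int,  step_no : int ) -> str:
--     # step_no should start from 0
--     text = ""
--     starter = 96
--     if step_no == 0 or step_no == ((size * 2) - 2) :
--         text += chr(starter + size)
--     else:
--         for i in range(0, step_no, 1):
--             text += chr(starter + (size - i))
--             text += "-"
--         text += chr(starter + (size - step_no)) + "-"
--         for i in range(step_no, 0, -1):
--             text += chr(starter + (size - i + 1))
--             if size != (size - i + 1):
--                 text += "-"
--     return text
-- ===== SOURCE B (Python) =====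
-- def form_line(size: int, step_no: int) -> str:
--     # Closed form: compute each character of the line directly from its position.
--     if step_no == 0 or step_no == 2 * size - 2:
--         return chr(96 + size)
--     return "".join(
--         "-" if k % 2 else chr(96 + size - step_no + abs(step_no - k // 2))
--         for k in range(4 * step_no + 1)
--     )
-- ===== Notes on version B (the rewrite author's own statement) =====
-- stated objective: alternative
-- what changed: A builds the line sequentially with three append loops and inline dash bookkeeping; B computes the whole line positionally: character at position k of the 4*step_no+1-long line is '-' when k is odd and chr(96+size-step_no+abs(step_no-k//2)) when even, joined in one pass.
-- outside the precondition, e.g. on form_line(3, -1): A returns 'd-', B returns ''; on form_line(60000, 0): A returns '\ueac0', B returns '\ueac0'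
import Mathlib
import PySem

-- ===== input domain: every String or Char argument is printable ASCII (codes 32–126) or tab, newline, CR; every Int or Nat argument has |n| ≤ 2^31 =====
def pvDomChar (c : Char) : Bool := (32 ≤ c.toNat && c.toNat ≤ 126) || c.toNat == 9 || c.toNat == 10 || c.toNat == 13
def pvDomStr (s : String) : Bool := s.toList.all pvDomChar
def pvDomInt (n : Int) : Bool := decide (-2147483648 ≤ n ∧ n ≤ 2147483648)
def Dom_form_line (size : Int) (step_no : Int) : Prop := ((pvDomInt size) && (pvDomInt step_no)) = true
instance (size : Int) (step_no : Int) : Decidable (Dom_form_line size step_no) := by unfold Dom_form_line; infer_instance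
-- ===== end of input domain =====

-- B replaces A's three sequential append loops by a positional closed form: the k-th
-- character of the 4*step_no+1-long line is '-' for odd k, else chr of a formula in k.
-- Equal return values on Pre_, proved below.

-- chr(n): exact for 0 ≤ n ≤ 0xD7FF, which Pre_form_line guarantees for every code used.
def pvChr (n : Int) : Char := Char.ofNat n.toNat

-- ===== PORT A =====
def form_line (size : Int) (step_no : Int) : String :=
  let starter : Int := 96
  if step_no = 0 ∨ step_no = size * 2 - 2 then
    String.ofList [pvChr (starter + size)]
  else
    let text1 : List Char :=
      (PySem.List.pyRange 0 step_no 1).foldl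
        (fun t i => t ++ [pvChr (starter + (size - i)), '-']) []
    let text2 : List Char := text1 ++ [pvChr (starter + (size - step_no)), '-']
    let text3 : List Char :=
      (PySem.List.pyRange step_no 0 (-1)).foldl
        (fun t i =>
          (t ++ [pvChr (starter + (size - i + 1))]) ++
            (if size ≠ size - i + 1 then ['-'] else [])) text2
    String.ofList text3

-- ===== PORT B =====
def form_line_alt (size : Int) (step_no : Int) : String :=
  if step_no = 0 ∨ step_no = 2 * size - 2 then
    String.ofList [pvChr (96 + size)]
  else
    String.ofList
      ((PySem.List.pyRange 0 (4 * step_no + 1) 1).map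
        (fun k =>
          if PySem.Int.mod k 2 ≠ 0 then '-'
          else pvChr (96 + size - step_no + |step_no - PySem.Int.floordiv k 2|)))

-- ===== PRECONDITION & SPEC =====
-- Pre_ restricts to the pattern's natural domain: step counts from 0 (negative step_no is
-- malformed input, on which A's trailing-dash value is leftover loop state) and every
-- character code 96+size-i stays a real codepoint below the surrogates, 0 ≤ code ≤ 0xD7FF
-- (above 0x10FFFF A raises ValueError; codes in the surrogate/astral range are not
-- alphabet-pattern letters).
def Pre_form_line (size : Int) (step_no : Int) : Prop :=
  0 ≤ size + 96 ∧ size + 96 ≤ 55295 ∧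
    (step_no = 0 ∨ step_no = 2 * size - 2 ∨ (1 ≤ step_no ∧ 0 ≤ size - step_no + 96))
instance (size : Int) (step_no : Int) : Decidable (Pre_form_line size step_no) := by
  unfold Pre_form_line; infer_instance
def pvWitness_form_line : Int × Int := (3, 1)

def Spec_form_line (size : Int) (step_no : Int) (out : String) : Prop := out = form_line_alt size step_no
instance (size : Int) (step_no : Int) (out : String) : Decidable (Spec_form_line size step_no out) := by unfold Spec_form_line; infer_instance

-- ===== CLAIM (what is proved, stated in full; the proofs are below) =====
def Claim_equal_form_line : Prop := ∀ (size : Int) (step_no : Int), Dom_form_line size step_no → Pre_form_line size step_no → Spec_form_line size step_no (form_line size step_no)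

-- ===== LEMMAS AND PROOFS =====

-- canonical shapes of A's two loops, indexed by n = step_no.toNat
def pvF (c : Int → Char) : Nat → List Char
  | 0 => []
  | n + 1 => pvF c n ++ [c n, '-']

def pvG (c : Int → Char) : Nat → List Char
  | 0 => []
  | n + 1 => [c n] ++ (if n = 0 then [] else ['-']) ++ pvG c n

-- the common palindromic line, peeled from the OUTSIDE (outer char = c 0)
def pvShift (c : Int → Char) : Int → Char := fun j => c (j + 1)

def pvP (c : Int → Char) : Nat → List Char
  | 0 => [c 0]
  | n + 1 => [c 0, '-'] ++ pvP (pvShift c) n ++ ['-', c 0]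

-- A's first loop
lemma loopA1_eq (c : Int → Char) (n : Nat) :
    ∀ init : List Char,
      (PySem.List.pyRange 0 (n : Int) 1).foldl (fun t i => t ++ [c i, '-']) init
        = init ++ pvF c n := by
  induction n with
  | zero => intro init; simp [PySem.List.pyRange_one_eq_nil, pvF]
  | succ m ih =>
      intro init
      rw [show ((m + 1 : Nat) : Int) = (m : Int) + 1 by push_cast; ring,
        PySem.List.pyRange_one_succ_right (a := 0) (b := (m : Int)) (by exact Int.natCast_nonneg m)]
      simp only [List.foldl_append, ih init, List.foldl_cons, List.foldl_nil, pvF]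
      simp

-- A's second (countdown) loop
lemma loopA2_eq (size : Int) (c : Int → Char) (n : Nat) :
    ∀ init : List Char,
      (PySem.List.pyRange (n : Int) 0 (-1)).foldl
        (fun t i => (t ++ [c (i - 1)]) ++ (if size ≠ size - i + 1 then ['-'] else [])) init
        = init ++ pvG c n := by
  induction n with
  | zero => intro init; simp [PySem.List.pyRange_neg_one_eq_nil, pvG]
  | succ m ih =>
      intro init
      rw [PySem.List.pyRange_neg_one_cons (by exact_mod_cast Nat.succ_pos m)]
      simp only [List.foldl_cons]
      rw [show ((m + 1 : Nat) : Int) - 1 = (m : Int) by push_cast; ring, ih]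
      have hc : (size ≠ size - ((m + 1 : Nat) : Int) + 1) ↔ ¬ (m = 0) := by
        constructor <;> intro h <;> omega
      rw [if_congr hc rfl rfl]
      cases m with
      | zero => simp [pvG]
      | succ k => simp [pvG]

-- peeling the outer character off A's loop shapes
lemma pvG_succ (c : Int → Char) (n : Nat) :
    pvG c (n + 1) = [c n] ++ (if n = 0 then [] else ['-']) ++ pvG c n := rfl

lemma pvF_shift (c : Int → Char) (m : Nat) :
    pvF c (m + 1) = [c 0, '-'] ++ pvF (pvShift c) m := by
  induction m with
  | zero => simp [pvF]
  | succ k ih =>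
      rw [show pvF c (k + 1 + 1) = pvF c (k + 1) ++ [c (k + 1), '-'] from rfl, ih]
      simp [pvF, pvShift]

lemma pvG_shift (c : Int → Char) (m : Nat) (hm : 1 ≤ m) :
    pvG c (m + 1) = pvG (pvShift c) m ++ ['-', c 0] := by
  induction m with
  | zero => omega
  | succ k ih =>
      cases k with
      | zero =>
          show pvG c 2 = pvG (pvShift c) 1 ++ ['-', c 0]
          simp [pvG, pvShift]
      | succ j =>
          rw [pvG_succ c (j + 1 + 1), pvG_succ (pvShift c) (j + 1), ih (by omega)]
          simp only [pvShift, if_neg (Nat.succ_ne_zero j), if_neg (Nat.succ_ne_zero (j+1))]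
          have harg : c ((j + 1 + 1 : Nat) : Int) = c (((j + 1 : Nat) : Int) + 1) := by
            congr 1
          rw [harg]; simp

-- A's output equals the common palindromic line
lemma a_eq_pvP (c : Int → Char) (n : Nat) (hn : 1 ≤ n) :
    pvF c (n + 1) ++ pvG c n = pvP c n := by
  induction n generalizing c with
  | zero => omega
  | succ m ih =>
      cases m with
      | zero =>
          show pvF c 2 ++ pvG c 1 = pvP c 1
          simp [pvF, pvG, pvP, pvShift]
      | succ j =>
          rw [pvF_shift c (j + 1 + 1), pvG_shift c (j + 1) (by omega)]
          have := ih (pvShift c) (by omega)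
          rw [show pvP c (j + 1 + 1)
                = [c 0, '-'] ++ pvP (pvShift c) (j + 1) ++ ['-', c 0] from rfl, ← this]
          simp

-- B's positional character function, on Nat positions
def pvgN (c : Int → Char) (n : Nat) (k : Nat) : Char :=
  if k % 2 = 1 then '-' else c ((n : Int) - |(n : Int) - ((k / 2 : Nat) : Int)|)

-- B's positional map equals the common palindromic line
lemma b_eq_pvP (c : Int → Char) (n : Nat) (hn : 1 ≤ n) :
    (List.range (4 * n + 1)).map (pvgN c n) = pvP c n := by
  induction n generalizing c with
  | zero => omega
  | succ m ih =>
      cases m with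
      | zero =>
          show (List.range 5).map (pvgN c 1) = pvP c 1
          have e0 : pvgN c 1 0 = c 0 := by
            unfold pvgN; rw [if_neg (by norm_num)]; congr 1
          have e2 : pvgN c 1 2 = c 1 := by
            unfold pvgN; rw [if_neg (by norm_num)]; congr 1
          have e4 : pvgN c 1 4 = c 0 := by
            unfold pvgN; rw [if_neg (by norm_num)]; congr 1
          simp [List.range_succ, pvP, pvShift, e0, e2, e4]
          constructor <;> rfl
      | succ j =>
          set m := j + 1 with hm
          have hrange : List.range (4 * (m + 1) + 1)
              = 0 :: 1 :: (List.range (4 * m + 1)).map (fun k => k + 2)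
                ++ [4 * m + 3, 4 * m + 4] := by
            rw [show 4 * (m + 1) + 1 = (4 * m + 4) + 1 by ring, List.range_succ,
              show 4 * m + 4 = (4 * m + 3) + 1 by ring, List.range_succ,
              show 4 * m + 3 = (4 * m + 2) + 1 by ring, List.range_succ_eq_map,
              show 4 * m + 2 = (4 * m + 1) + 1 by ring, List.range_succ_eq_map]
            simp only [List.map_cons, List.map_map, List.cons_append, List.append_assoc]
            have hmf : (List.range (4 * m + 1)).map (Nat.succ ∘ Nat.succ)
                = (List.range (4 * m + 1)).map (fun k => k + 2) :=
              List.map_congr_left (fun a _ => by simp [Function.comp])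
            rw [hmf]; simp
          rw [hrange]
          simp only [List.map_append, List.map_cons, List.map_map, List.map_nil]
          have h0 : pvgN c (m + 1) 0 = c 0 := by
            unfold pvgN; rw [if_neg (by norm_num)]
            congr 1; rw [Int.abs_eq_natAbs]; omega
          have h1 : pvgN c (m + 1) 1 = '-' := by
            unfold pvgN; rw [if_pos (by norm_num)]
          have h3 : pvgN c (m + 1) (4 * m + 3) = '-' := by
            unfold pvgN; rw [if_pos (by omega)]
          have h4 : pvgN c (m + 1) (4 * m + 4) = c 0 := by
            unfold pvgN; rw [if_neg (by omega)]
            congr 1; rw [Int.abs_eq_natAbs]; omega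
          have hmid : (pvgN c (m + 1)) ∘ (fun k => k + 2) = pvgN (pvShift c) m := by
            funext k
            simp only [Function.comp, pvgN, show (k + 2) % 2 = k % 2 by omega]
            by_cases hk : k % 2 = 1
            · rw [if_pos hk, if_pos hk]
            · rw [if_neg hk, if_neg hk]
              simp only [pvShift]
              congr 1
              rw [Int.abs_eq_natAbs, Int.abs_eq_natAbs]
              omega
          rw [hmid, ih (pvShift c) (by omega), h0, h1, h3, h4]
          simp [pvP]

-- ===== VERDICT (by name: the statement is the Claim_ definition above) =====
theorem form_line_spec : Claim_equal_form_line := by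
  intro size step_no _hdom hpre
  unfold Spec_form_line form_line form_line_alt
  by_cases hg : step_no = 0 ∨ step_no = 2 * size - 2
  · have hg' : step_no = 0 ∨ step_no = size * 2 - 2 := by omega
    simp only [if_pos hg, if_pos hg']
  · have hg' : ¬ (step_no = 0 ∨ step_no = size * 2 - 2) := by
      intro h; exact hg (by omega)
    simp only [if_neg hg, if_neg hg']
    obtain ⟨-, -, hcase⟩ := hpre
    have hstep : 1 ≤ step_no := by rcases hcase with h | h | h <;> omega
    set n : Nat := step_no.toNat with hn
    have hcast : (n : Int) = step_no := Int.toNat_of_nonneg (by omega)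
    have hn1 : 1 ≤ n := by omega
    set c : Int → Char := fun j => pvChr (96 + size - j) with hc
    -- A side
    have hbody1 : (fun (t : List Char) i => t ++ [pvChr (96 + (size - i)), '-'])
        = fun t i => t ++ [c i, '-'] := by
      funext t i; simp [hc, show 96 + (size - i) = 96 + size - i by ring]
    have hbody2 : (fun (t : List Char) i =>
          (t ++ [pvChr (96 + (size - i + 1))]) ++ (if size ≠ size - i + 1 then ['-'] else []))
        = fun t i => (t ++ [c (i - 1)]) ++ (if size ≠ size - i + 1 then ['-'] else []) := by
      funext t i; simp [hc, show 96 + size - (i - 1) = 96 + (size - i + 1) by ring]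
    rw [hbody1, hbody2, ← hcast, loopA1_eq c n [], loopA2_eq size c n]
    have hmid : pvChr (96 + (size - (n : Int))) = c (n : Int) := by
      simp [hc, show 96 + size - (n:Int) = 96 + (size - (n:Int)) by ring]
    have hA : ([] : List Char) ++ pvF c n ++ [c (n : Int), '-'] ++ pvG c n
        = pvF c (n + 1) ++ pvG c n := by simp [pvF]
    rw [hmid, hA, a_eq_pvP c n hn1]
    -- B side
    rw [PySem.List.pyRange_one,
      show (4 * (n : Int) + 1 - 0).toNat = 4 * n + 1 by omega, List.map_map]
    have hbmap : (fun k =>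
          if PySem.Int.mod k 2 ≠ 0 then '-'
          else pvChr (96 + size - (n : Int) + |(n : Int) - PySem.Int.floordiv k 2|))
        ∘ (fun k : Nat => (0 : Int) + (k : Int)) = pvgN c n := by
      funext k
      have hdiv : PySem.Int.floordiv ((k : Nat) : Int) 2 = ((k / 2 : Nat) : Int) := by
        rw [PySem.Int.floordiv_eq_ediv_of_pos (by norm_num)]; omega
      have hmod : PySem.Int.mod ((k : Nat) : Int) 2 = ((k % 2 : Nat) : Int) := by
        rw [PySem.Int.mod_eq_emod_of_pos (by norm_num)]; omega
      simp only [Function.comp, zero_add, hdiv, hmod, pvgN]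
      by_cases hk : k % 2 = 1
      · rw [if_pos (by exact_mod_cast by omega), if_pos hk]
      · rw [if_neg (by simp; omega), if_neg hk]
        simp only [hc]
        congr 1
        ring
    rw [hbmap, b_eq_pvP c n hn1]
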